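-- pv_equiv track=rewrite | github.com/pypi-data/pypi-mirror-384 | packages/walltheme/walltheme-0.2.3.tar.gz/walltheme-0.2.3/walltheme/utils.py | split_theme
-- ===== SOURCE A (Python) =====
-- def split_theme(theme: dict):
-- 	"""
-- 	Splits the various types of data to facilitate the creation of templates
-- 	"""
--
-- 	i = 0
-- 	wallpaper = ''
-- 	special = {}
-- 	palette = {}
-- 	for k, v in theme.items():
-- 		if i <= 0:
-- 			wallpaper = v
-- 		elif 0 < i < 4:
-- 			special[k] = v
-- 		else:
-- 			palette[k] = v
--
-- 		i += 1
--
-- 	return wallpaper, special, palette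
-- ===== SOURCE B (Python) =====
-- def split_theme(theme: dict):
--     """
--     Splits the various types of data to facilitate the creation of templates
--     """
--     items = list(theme.items())
--     wallpaper = items[0][1] if items else ''
--     return wallpaper, dict(items[1:4]), dict(items[4:])
-- ===== Notes on version B (the rewrite author's own statement) =====
-- stated objective: simpler
-- what changed: Replaces the running counter with per-element if/elif/else dispatch by materialising the items once and slicing it positionally into head, [1:4] and [4:].
import Mathlib
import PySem

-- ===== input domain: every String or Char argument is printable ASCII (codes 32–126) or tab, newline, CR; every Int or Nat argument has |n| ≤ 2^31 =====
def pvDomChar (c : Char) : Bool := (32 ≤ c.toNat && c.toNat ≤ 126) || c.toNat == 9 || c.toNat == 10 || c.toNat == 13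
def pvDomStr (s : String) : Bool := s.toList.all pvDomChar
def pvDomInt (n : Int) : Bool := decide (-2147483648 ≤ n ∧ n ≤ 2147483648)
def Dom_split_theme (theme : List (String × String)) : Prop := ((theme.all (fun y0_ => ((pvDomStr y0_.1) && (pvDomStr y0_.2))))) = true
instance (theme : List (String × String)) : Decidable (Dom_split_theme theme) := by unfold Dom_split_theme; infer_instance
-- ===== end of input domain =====

-- B replaces A's running counter and per-element if/elif/else dispatch by slicing the
-- items list positionally (head, [1:4], [4:]); objective: simpler.


-- ===== PORT A =====
-- state: (i, wallpaper, special, palette), exactly A's loop variables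
def split_theme_step (st : Int × String × PySem.Dict String String × PySem.Dict String String)
    (kv : String × String) : Int × String × PySem.Dict String String × PySem.Dict String String :=
  if st.1 ≤ 0 then (st.1 + 1, kv.2, st.2.2.1, st.2.2.2)
  else if 0 < st.1 ∧ st.1 < 4 then (st.1 + 1, st.2.1, st.2.2.1.insert kv.1 kv.2, st.2.2.2)
  else (st.1 + 1, st.2.1, st.2.2.1, st.2.2.2.insert kv.1 kv.2)

def split_theme (theme : List (String × String)) : String × (List (String × String)) × (List (String × String)) :=
  let st := theme.foldl split_theme_step ((0 : Int), "", PySem.Dict.empty, PySem.Dict.empty)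
  (st.2.1, st.2.2.1.items, st.2.2.2.items)

-- ===== PORT B =====
def split_theme_alt (theme : List (String × String)) : String × (List (String × String)) × (List (String × String)) :=
  let wallpaper := match theme with | [] => "" | kv :: _ => kv.2
  (wallpaper,
   (PySem.Dict.ofList (PySem.List.slice theme (some 1) (some 4))).items,
   (PySem.Dict.ofList (PySem.List.slice theme (some 4) none)).items)

-- ===== PRECONDITION & SPEC =====
def Spec_split_theme (theme : List (String × String)) (out : String × (List (String × String)) × (List (String × String))) : Prop := out = split_theme_alt theme
instance (theme : List (String × String)) (out : String × (List (String × String)) × (List (String × String))) : Decidable (Spec_split_theme theme out) := by unfold Spec_split_theme; infer_instance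

-- ===== CLAIM (what is proved, stated in full; the proofs are below) =====
def Claim_equal_split_theme : Prop := ∀ (theme : List (String × String)), Dom_split_theme theme → Spec_split_theme theme (split_theme theme)

-- ===== LEMMAS AND PROOFS =====

-- once i ≥ 4, A's loop only inserts into palette and counts up
theorem split_theme_loop_ge4 (l : List (String × String)) (i : Int) (hi : 4 ≤ i)
    (w : String) (s p : PySem.Dict String String) :
    l.foldl split_theme_step (i, w, s, p)
      = (i + l.length, w, s, l.foldl (fun d kv => d.insert kv.1 kv.2) p) := by
  induction l generalizing i p with
  | nil => simp
  | cons kv rest ih =>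
    have h1 : ¬ i ≤ 0 := by omega
    have h2 : ¬ (0 < i ∧ i < 4) := by omega
    simp only [List.foldl_cons, split_theme_step, h1, h2, if_false]
    rw [ih (i + 1) (by omega)]
    simp [List.length_cons]
    ring

theorem split_theme_spec : Claim_equal_split_theme := by
  intro theme _
  show split_theme theme = split_theme_alt theme
  match theme with
  | [] => rfl
  | [a] => rfl
  | [a, b] => rfl
  | [a, b, c] => rfl
  | a :: b :: c :: d :: rest =>
    simp only [split_theme, List.foldl_cons]
    rw [show split_theme_step (split_theme_step (split_theme_step (split_theme_step
          ((0 : Int), "", PySem.Dict.empty, PySem.Dict.empty) a) b) c) d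
        = ((4 : Int), a.2,
           ((PySem.Dict.empty.insert b.1 b.2).insert c.1 c.2).insert d.1 d.2,
           PySem.Dict.empty) from by simp [split_theme_step]]
    rw [split_theme_loop_ge4 rest 4 (by omega)]
    simp only [split_theme_alt]
    rw [show PySem.List.slice (a :: b :: c :: d :: rest) (some 1) (some 4) = [b, c, d] from by
          simp [PySem.List.slice_toNat]]
    rw [show PySem.List.slice (a :: b :: c :: d :: rest) (some 4) none = rest from by
          simp [PySem.List.slice_from]]
    rfl
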